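-- pv_equiv track=rewrite | github.com/Darkneew/Pentago-AI | graphic version/IA.py | fe_naive
-- ===== SOURCE A (Python) =====
-- def bien_def(i,j, n):
--     if i>=n:
--         return False
--     if i<0:
--         return False
--     if j>=n:
--         return False
--     if j<0:
--         return False
--     return True
--
-- def fe_naive (g, side):
--     score = 0
--     n = len(g[0])
--     autours = [-1, 0, 1]
--     for i in range(n):
--         for j in range(n):
--             if g[i][j] == 0: continue
--             elif g[i][j] == side:
--                 value = 1
--             else:
--                 value = -1
--             for k in autours:
--                 for l in autours:
--                     if not bien_def(i+k, j+l, n): continue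
--                     if g[i][j] == g[i+k][j+l]: score += value
--     return score
-- ===== SOURCE B (Python) =====
-- def fe_naive(g, side):
--     n = len(g[0])
--     score = 0
--     for i in range(n):
--         for j in range(n):
--             c = g[i][j]
--             if c == 0:
--                 continue
--             value = 1 if c == side else -1
--             score += value  # the k=l=0 self pair of the naive scan
--             for di, dj in ((0, 1), (1, 0), (1, 1), (1, -1)):
--                 ni, nj = i + di, j + dj
--                 if 0 <= ni < n and 0 <= nj < n and g[ni][nj] == c:
--                     score += 2 * value  # each unordered pair counted once, both endpoints
--     return score
-- ===== Notes on version B (the rewrite author's own statement) =====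
-- stated objective: faster
-- what changed: Instead of summing each cell's value over all 9 offsets of its 3x3 neighborhood, B adds each non-empty cell's value once (the self pair) and scans only the 4 forward offsets, adding 2*value per matching in-bounds pair; by symmetry of the pair relation this halves the neighbor probes per cell.
import Mathlib
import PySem

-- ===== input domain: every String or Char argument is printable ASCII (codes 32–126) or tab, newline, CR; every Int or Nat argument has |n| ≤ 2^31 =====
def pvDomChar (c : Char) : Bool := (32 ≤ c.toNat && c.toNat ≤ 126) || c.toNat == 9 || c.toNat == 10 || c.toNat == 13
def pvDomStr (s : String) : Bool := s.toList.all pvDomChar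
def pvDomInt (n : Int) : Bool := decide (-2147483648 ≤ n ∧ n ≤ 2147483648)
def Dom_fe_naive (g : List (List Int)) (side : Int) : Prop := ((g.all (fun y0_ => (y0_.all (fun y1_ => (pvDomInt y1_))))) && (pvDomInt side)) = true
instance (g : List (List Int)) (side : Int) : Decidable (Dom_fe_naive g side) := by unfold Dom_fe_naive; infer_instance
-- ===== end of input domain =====

-- B replaces A's 9-offset neighborhood scan by a self term plus a 4-forward-offset scan that counts each adjacent matching pair once with weight 2 (alternative decomposition, same asymptotic cost).

-- ===== PORT A =====
-- g[i][j]: in range under Pre_, where it equals the Python access (default never read there)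
def pvCell (g : List (List Int)) (i j : Int) : Int :=
  PySem.List.pyGetD (PySem.List.pyGetD g i []) j 0

def bien_def (i j n : Int) : Bool :=
  if i ≥ n then false
  else if i < 0 then false
  else if j ≥ n then false
  else if j < 0 then false
  else true

def fe_naive (g : List (List Int)) (side : Int) : Int :=
  let n : Int := PySem.List.len (PySem.List.pyGetD g 0 [])
  let autours : List Int := [-1, 0, 1]
  (PySem.List.pyRange 0 n 1).foldl (fun score i =>
    (PySem.List.pyRange 0 n 1).foldl (fun score j =>
      if pvCell g i j = 0 then score
      else
        let value : Int := if pvCell g i j = side then 1 else -1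
        autours.foldl (fun score k =>
          autours.foldl (fun score l =>
            if ¬ (bien_def (i + k) (j + l) n = true) then score
            else if pvCell g i j = pvCell g (i + k) (j + l) then score + value
            else score) score) score) score) 0

-- ===== PORT B =====
def fe_naive_alt (g : List (List Int)) (side : Int) : Int :=
  let n : Int := PySem.List.len (PySem.List.pyGetD g 0 [])
  let dirs : List (Int × Int) := [(0, 1), (1, 0), (1, 1), (1, -1)]
  (PySem.List.pyRange 0 n 1).foldl (fun score i =>
    (PySem.List.pyRange 0 n 1).foldl (fun score j =>
      let c := pvCell g i j
      if c = 0 then score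
      else
        let value : Int := if c = side then 1 else -1
        dirs.foldl (fun score d =>
          if 0 ≤ i + d.1 ∧ i + d.1 < n ∧ 0 ≤ j + d.2 ∧ j + d.2 < n ∧
             pvCell g (i + d.1) (j + d.2) = c then score + 2 * value
          else score) (score + value)) score) 0

-- ===== PRECONDITION & SPEC =====
-- Pre_ excludes exactly the inputs on which the Python A raises IndexError:
-- empty g (len(g[0])), or a g whose first n rows (n = len(g[0])) are missing or shorter than n.
def Pre_fe_naive (g : List (List Int)) (side : Int) : Prop :=
  g ≠ [] ∧ (g.headD []).length ≤ g.length ∧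
    ∀ row ∈ g.take (g.headD []).length, (g.headD []).length ≤ row.length
instance (g : List (List Int)) (side : Int) : Decidable (Pre_fe_naive g side) := by
  unfold Pre_fe_naive; infer_instance
def pvWitness_fe_naive : List (List Int) × Int := ([[1, 0], [0, 2]], 1)

def Spec_fe_naive (g : List (List Int)) (side : Int) (out : Int) : Prop := out = fe_naive_alt g side
instance (g : List (List Int)) (side : Int) (out : Int) : Decidable (Spec_fe_naive g side out) := by unfold Spec_fe_naive; infer_instance

-- ===== CLAIM (what is proved, stated in full; the proofs are below) =====
def Claim_equal_fe_naive : Prop := ∀ (g : List (List Int)) (side : Int), Dom_fe_naive g side → Pre_fe_naive g side → Spec_fe_naive g side (fe_naive g side)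

-- ===== LEMMAS AND PROOFS =====

-- contribution of the ordered pair ((i,j),(i+p,j+q)) in the naive scan
def pvT (g : List (List Int)) (side n p q i j : Int) : Int :=
  if 0 ≤ i + p ∧ i + p < n ∧ 0 ≤ j + q ∧ j + q < n ∧
     pvCell g i j ≠ 0 ∧ pvCell g i j = pvCell g (i + p) (j + q) then
    (if pvCell g i j = side then 1 else -1)
  else 0

-- per-cell totals of A's inner loops and of B's inner loop
def pvT9 (g : List (List Int)) (side n i j : Int) : Int :=
  pvT g side n (-1) (-1) i j + pvT g side n (-1) 0 i j + pvT g side n (-1) 1 i j +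
  pvT g side n 0 (-1) i j + pvT g side n 0 0 i j + pvT g side n 0 1 i j +
  pvT g side n 1 (-1) i j + pvT g side n 1 0 i j + pvT g side n 1 1 i j

def pvT5 (g : List (List Int)) (side n i j : Int) : Int :=
  pvT g side n 0 0 i j +
  (pvT g side n 0 1 i j + pvT g side n 0 1 i j) +
  (pvT g side n 1 0 i j + pvT g side n 1 0 i j) +
  (pvT g side n 1 1 i j + pvT g side n 1 1 i j) +
  (pvT g side n 1 (-1) i j + pvT g side n 1 (-1) i j)

-- total contribution of offset (p,q) over the whole board
def pvN (g : List (List Int)) (side n p q : Int) : Int :=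
  ((PySem.List.pyRange 0 n 1).map (fun i =>
    ((PySem.List.pyRange 0 n 1).map (fun j => pvT g side n p q i j)).sum)).sum

theorem pvBien_iff (i j n : Int) : bien_def i j n = true ↔ (0 ≤ i ∧ i < n ∧ 0 ≤ j ∧ j < n) := by
  unfold bien_def
  split_ifs <;> simp <;> omega

-- per-cell value of A's inner loops
theorem pvA_cell (g : List (List Int)) (side n i j s : Int) :
    (if pvCell g i j = 0 then s
     else
       let value : Int := if pvCell g i j = side then 1 else -1
       ([-1, 0, 1] : List Int).foldl (fun score k =>
         ([-1, 0, 1] : List Int).foldl (fun score l =>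
           if ¬ (bien_def (i + k) (j + l) n = true) then score
           else if pvCell g i j = pvCell g (i + k) (j + l) then score + value
           else score) score) s) =
    s + pvT9 g side n i j := by
  by_cases hc : pvCell g i j = 0
  · rw [if_pos hc]; simp [pvT9, pvT, hc]
  · rw [if_neg hc]
    have e : ∀ (k l s : Int),
        (if ¬ (bien_def (i + k) (j + l) n = true) then s
         else if pvCell g i j = pvCell g (i + k) (j + l) then s + (if pvCell g i j = side then 1 else -1)
         else s) = s + pvT g side n k l i j := by
      intro k l s
      by_cases hb : bien_def (i + k) (j + l) n = true
      · rcases (pvBien_iff _ _ _).mp hb with ⟨h1, h2, h3, h4⟩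
        by_cases he : pvCell g i j = pvCell g (i + k) (j + l)
        · rw [if_neg (by simp [hb]), if_pos he]
          have hcond : 0 ≤ i + k ∧ i + k < n ∧ 0 ≤ j + l ∧ j + l < n ∧
              pvCell g i j ≠ 0 ∧ pvCell g i j = pvCell g (i + k) (j + l) :=
            ⟨h1, h2, h3, h4, hc, he⟩
          simp only [pvT]
          rw [if_pos hcond]
        · rw [if_neg (by simp [hb]), if_neg he]
          simp only [pvT]
          rw [if_neg (fun h => he h.2.2.2.2.2)]
          ring
      · rw [if_pos (by simp [hb])]
        have hnb : ¬ (0 ≤ i + k ∧ i + k < n ∧ 0 ≤ j + l ∧ j + l < n) := fun h =>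
          hb ((pvBien_iff _ _ _).mpr h)
        simp only [pvT]
        rw [if_neg (fun h => hnb ⟨h.1, h.2.1, h.2.2.1, h.2.2.2.1⟩)]
        ring
    simp only [List.foldl_cons, List.foldl_nil]
    simp only [e]
    unfold pvT9
    ring

-- per-cell value of B's inner loop (needs the cell to be on the board for the self term)
theorem pvB_cell (g : List (List Int)) (side n i j s : Int)
    (hi1 : 0 ≤ i) (hi2 : i < n) (hj1 : 0 ≤ j) (hj2 : j < n) :
    (if pvCell g i j = 0 then s
     else
       let value : Int := if pvCell g i j = side then 1 else -1
       ([(0, 1), (1, 0), (1, 1), (1, -1)] : List (Int × Int)).foldl (fun score d =>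
         if 0 ≤ i + d.1 ∧ i + d.1 < n ∧ 0 ≤ j + d.2 ∧ j + d.2 < n ∧
            pvCell g (i + d.1) (j + d.2) = pvCell g i j then score + 2 * value
         else score) (s + value)) =
    s + pvT5 g side n i j := by
  by_cases hc : pvCell g i j = 0
  · rw [if_pos hc]; simp [pvT5, pvT, hc]
  · rw [if_neg hc]
    have e : ∀ (p q s : Int),
        (if 0 ≤ i + p ∧ i + p < n ∧ 0 ≤ j + q ∧ j + q < n ∧
            pvCell g (i + p) (j + q) = pvCell g i j
         then s + 2 * (if pvCell g i j = side then 1 else -1)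
         else s) = s + 2 * pvT g side n p q i j := by
      intro p q s
      by_cases hcond : 0 ≤ i + p ∧ i + p < n ∧ 0 ≤ j + q ∧ j + q < n ∧
          pvCell g (i + p) (j + q) = pvCell g i j
      · rw [if_pos hcond]
        have hcond' : 0 ≤ i + p ∧ i + p < n ∧ 0 ≤ j + q ∧ j + q < n ∧
            pvCell g i j ≠ 0 ∧ pvCell g i j = pvCell g (i + p) (j + q) :=
          ⟨hcond.1, hcond.2.1, hcond.2.2.1, hcond.2.2.2.1, hc, hcond.2.2.2.2.symm⟩
        simp only [pvT]
        rw [if_pos hcond']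
      · rw [if_neg hcond]
        simp only [pvT]
        rw [if_neg (fun h => hcond ⟨h.1, h.2.1, h.2.2.1, h.2.2.2.1, h.2.2.2.2.2.symm⟩)]
        ring
    have hT00 : pvT g side n 0 0 i j = (if pvCell g i j = side then 1 else -1) := by
      have hcond0 : 0 ≤ i + 0 ∧ i + 0 < n ∧ 0 ≤ j + 0 ∧ j + 0 < n ∧
          pvCell g i j ≠ 0 ∧ pvCell g i j = pvCell g (i + 0) (j + 0) :=
        ⟨by omega, by omega, by omega, by omega, hc, by norm_num⟩
      simp only [pvT]
      rw [if_pos hcond0]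
    simp only [List.foldl_cons, List.foldl_nil]
    simp only [e]
    unfold pvT5
    rw [hT00]
    ring

theorem pvN_symm (g : List (List Int)) (side n p q : Int) :
    pvN g side n p q = pvN g side n (-p) (-q) := by
  have hnd : (PySem.List.pyRange 0 n 1).Nodup := PySem.List.nodup_pyRange_one 0 n
  have key : ∀ p q : Int, pvN g side n p q =
      ∑ x ∈ ((PySem.List.pyRange 0 n 1).toFinset ×ˢ (PySem.List.pyRange 0 n 1).toFinset),
        pvT g side n p q x.1 x.2 := by
    intro p q
    unfold pvN
    rw [Finset.sum_product]
    rw [← List.sum_toFinset _ hnd]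
    refine Finset.sum_congr rfl fun i _ => ?_
    rw [← List.sum_toFinset _ hnd]
  have hmem : ∀ x : Int × Int,
      x ∈ ((PySem.List.pyRange 0 n 1).toFinset ×ˢ (PySem.List.pyRange 0 n 1).toFinset) ↔
        (0 ≤ x.1 ∧ x.1 < n ∧ 0 ≤ x.2 ∧ x.2 < n) := by
    intro x
    simp [Finset.mem_product, List.mem_toFinset, PySem.List.mem_pyRange_one]
    omega
  rw [key p q, key (-p) (-q)]
  simp only [pvT]
  calc
    ∑ x ∈ ((PySem.List.pyRange 0 n 1).toFinset ×ˢ (PySem.List.pyRange 0 n 1).toFinset),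
        (if 0 ≤ x.1 + p ∧ x.1 + p < n ∧ 0 ≤ x.2 + q ∧ x.2 + q < n ∧
            pvCell g x.1 x.2 ≠ 0 ∧ pvCell g x.1 x.2 = pvCell g (x.1 + p) (x.2 + q) then
          (if pvCell g x.1 x.2 = side then 1 else -1) else 0)
      = ∑ x ∈ (((PySem.List.pyRange 0 n 1).toFinset ×ˢ (PySem.List.pyRange 0 n 1).toFinset).filter
          (fun x => 0 ≤ x.1 + p ∧ x.1 + p < n ∧ 0 ≤ x.2 + q ∧ x.2 + q < n ∧
            pvCell g x.1 x.2 ≠ 0 ∧ pvCell g x.1 x.2 = pvCell g (x.1 + p) (x.2 + q))),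
          (if pvCell g x.1 x.2 = side then (1 : Int) else -1) := (Finset.sum_filter _ _).symm
    _ = ∑ x ∈ (((PySem.List.pyRange 0 n 1).toFinset ×ˢ (PySem.List.pyRange 0 n 1).toFinset).filter
          (fun x => 0 ≤ x.1 + -p ∧ x.1 + -p < n ∧ 0 ≤ x.2 + -q ∧ x.2 + -q < n ∧
            pvCell g x.1 x.2 ≠ 0 ∧ pvCell g x.1 x.2 = pvCell g (x.1 + -p) (x.2 + -q))),
          (if pvCell g x.1 x.2 = side then (1 : Int) else -1) := by
        refine Finset.sum_nbij' (i := fun x => (x.1 + p, x.2 + q)) (j := fun x => (x.1 - p, x.2 - q))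
          ?_ ?_ ?_ ?_ ?_
        · intro a ha
          simp only [Finset.mem_filter, hmem] at ha
          obtain ⟨⟨b1, b2, b3, b4⟩, h1, h2, h3, h4, hne, heq⟩ := ha
          simp only [Finset.mem_filter, hmem]
          refine ⟨⟨by omega, by omega, by omega, by omega⟩, by omega, by omega, by omega, by omega,
            ?_, ?_⟩
          · rw [← heq]; exact hne
          · have e1 : a.1 + p + -p = a.1 := by ring
            have e2 : a.2 + q + -q = a.2 := by ring
            rw [e1, e2, ← heq]
        · intro a ha
          simp only [Finset.mem_filter, hmem] at ha
          obtain ⟨⟨b1, b2, b3, b4⟩, h1, h2, h3, h4, hne, heq⟩ := ha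
          simp only [Finset.mem_filter, hmem]
          refine ⟨⟨by omega, by omega, by omega, by omega⟩, by omega, by omega, by omega, by omega,
            ?_, ?_⟩
          · rw [sub_eq_add_neg, sub_eq_add_neg, ← heq]; exact hne
          · have e1 : a.1 - p + p = a.1 := by ring
            have e2 : a.2 - q + q = a.2 := by ring
            rw [e1, e2, sub_eq_add_neg, sub_eq_add_neg, ← heq]
        · intro a _
          obtain ⟨a1, a2⟩ := a
          dsimp only
          rw [Prod.mk.injEq]
          constructor <;> ring
        · intro a _
          obtain ⟨a1, a2⟩ := a
          dsimp only
          rw [Prod.mk.injEq]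
          constructor <;> ring
        · intro a ha
          simp only [Finset.mem_filter, hmem] at ha
          obtain ⟨⟨b1, b2, b3, b4⟩, h1, h2, h3, h4, hne, heq⟩ := ha
          dsimp only
          rw [← heq]
    _ = ∑ x ∈ ((PySem.List.pyRange 0 n 1).toFinset ×ˢ (PySem.List.pyRange 0 n 1).toFinset),
          (if 0 ≤ x.1 + -p ∧ x.1 + -p < n ∧ 0 ≤ x.2 + -q ∧ x.2 + -q < n ∧
              pvCell g x.1 x.2 ≠ 0 ∧ pvCell g x.1 x.2 = pvCell g (x.1 + -p) (x.2 + -q) then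
            (if pvCell g x.1 x.2 = side then 1 else -1) else 0) := Finset.sum_filter _ _

theorem pvA_sum (g : List (List Int)) (side : Int) :
    fe_naive g side =
      pvN g side (PySem.List.len (PySem.List.pyGetD g 0 [])) (-1) (-1) +
      pvN g side (PySem.List.len (PySem.List.pyGetD g 0 [])) (-1) 0 +
      pvN g side (PySem.List.len (PySem.List.pyGetD g 0 [])) (-1) 1 +
      pvN g side (PySem.List.len (PySem.List.pyGetD g 0 [])) 0 (-1) +
      pvN g side (PySem.List.len (PySem.List.pyGetD g 0 [])) 0 0 +
      pvN g side (PySem.List.len (PySem.List.pyGetD g 0 [])) 0 1 +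
      pvN g side (PySem.List.len (PySem.List.pyGetD g 0 [])) 1 (-1) +
      pvN g side (PySem.List.len (PySem.List.pyGetD g 0 [])) 1 0 +
      pvN g side (PySem.List.len (PySem.List.pyGetD g 0 [])) 1 1 := by
  unfold fe_naive
  dsimp only
  generalize PySem.List.len (PySem.List.pyGetD g 0 []) = n
  have step1 : ∀ (i s : Int),
      (PySem.List.pyRange 0 n 1).foldl (fun score j =>
        if pvCell g i j = 0 then score
        else
          let value : Int := if pvCell g i j = side then 1 else -1
          ([-1, 0, 1] : List Int).foldl (fun score k =>
            ([-1, 0, 1] : List Int).foldl (fun score l =>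
              if ¬ (bien_def (i + k) (j + l) n = true) then score
              else if pvCell g i j = pvCell g (i + k) (j + l) then score + value
              else score) score) score) s =
      s + ((PySem.List.pyRange 0 n 1).map (fun j => pvT9 g side n i j)).sum := by
    intro i s
    calc
      (PySem.List.pyRange 0 n 1).foldl _ s
        = (PySem.List.pyRange 0 n 1).foldl (fun s j => s + pvT9 g side n i j) s :=
          PySem.List.foldl_congr_mem _ _ _ _ (fun acc x _ => pvA_cell g side n i x acc)
      _ = s + ((PySem.List.pyRange 0 n 1).map (fun j => pvT9 g side n i j)).sum := by
          rw [PySem.List.foldl_add]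
  calc
    (PySem.List.pyRange 0 n 1).foldl _ 0
      = (PySem.List.pyRange 0 n 1).foldl (fun s i =>
          s + ((PySem.List.pyRange 0 n 1).map (fun j => pvT9 g side n i j)).sum) 0 :=
        PySem.List.foldl_congr_mem _ _ _ _ (fun acc x _ => step1 x acc)
    _ = 0 + ((PySem.List.pyRange 0 n 1).map (fun i =>
          ((PySem.List.pyRange 0 n 1).map (fun j => pvT9 g side n i j)).sum)).sum := by
        rw [PySem.List.foldl_add]
    _ = _ := by
        simp only [pvT9, PySem.List.sum_map_add_int]
        unfold pvN
        ring

theorem pvB_sum (g : List (List Int)) (side : Int) :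
    fe_naive_alt g side =
      pvN g side (PySem.List.len (PySem.List.pyGetD g 0 [])) 0 0 +
      2 * pvN g side (PySem.List.len (PySem.List.pyGetD g 0 [])) 0 1 +
      2 * pvN g side (PySem.List.len (PySem.List.pyGetD g 0 [])) 1 0 +
      2 * pvN g side (PySem.List.len (PySem.List.pyGetD g 0 [])) 1 1 +
      2 * pvN g side (PySem.List.len (PySem.List.pyGetD g 0 [])) 1 (-1) := by
  unfold fe_naive_alt
  dsimp only
  generalize PySem.List.len (PySem.List.pyGetD g 0 []) = n
  have step1 : ∀ (i : Int), i ∈ PySem.List.pyRange 0 n 1 → ∀ (s : Int),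
      (PySem.List.pyRange 0 n 1).foldl (fun score j =>
        if pvCell g i j = 0 then score
        else
          let value : Int := if pvCell g i j = side then 1 else -1
          ([(0, 1), (1, 0), (1, 1), (1, -1)] : List (Int × Int)).foldl (fun score d =>
            if 0 ≤ i + d.1 ∧ i + d.1 < n ∧ 0 ≤ j + d.2 ∧ j + d.2 < n ∧
               pvCell g (i + d.1) (j + d.2) = pvCell g i j then score + 2 * value
            else score) (score + value)) s =
      s + ((PySem.List.pyRange 0 n 1).map (fun j => pvT5 g side n i j)).sum := by
    intro i hi s
    rcases (PySem.List.mem_pyRange_one).mp hi with ⟨hi1, hi2⟩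
    calc
      (PySem.List.pyRange 0 n 1).foldl _ s
        = (PySem.List.pyRange 0 n 1).foldl (fun s j => s + pvT5 g side n i j) s := by
          refine PySem.List.foldl_congr_mem _ _ _ _ (fun acc x hx => ?_)
          rcases (PySem.List.mem_pyRange_one).mp hx with ⟨hj1, hj2⟩
          exact pvB_cell g side n i x acc hi1 hi2 hj1 hj2
      _ = s + ((PySem.List.pyRange 0 n 1).map (fun j => pvT5 g side n i j)).sum := by
          rw [PySem.List.foldl_add]
  calc
    (PySem.List.pyRange 0 n 1).foldl _ 0
      = (PySem.List.pyRange 0 n 1).foldl (fun s i =>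
          s + ((PySem.List.pyRange 0 n 1).map (fun j => pvT5 g side n i j)).sum) 0 :=
        PySem.List.foldl_congr_mem _ _ _ _ (fun acc x hx => step1 x hx acc)
    _ = 0 + ((PySem.List.pyRange 0 n 1).map (fun i =>
          ((PySem.List.pyRange 0 n 1).map (fun j => pvT5 g side n i j)).sum)).sum := by
        rw [PySem.List.foldl_add]
    _ = _ := by
        simp only [pvT5, PySem.List.sum_map_add_int]
        unfold pvN
        ring

-- ===== VERDICT (by name: the statement is the Claim_ definition above) =====
theorem fe_naive_spec : Claim_equal_fe_naive := by
  intro g side _ _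
  unfold Spec_fe_naive
  rw [pvA_sum, pvB_sum,
    pvN_symm g side _ (-1) (-1), pvN_symm g side _ (-1) 0,
    pvN_symm g side _ (-1) 1, pvN_symm g side _ 0 (-1)]
  simp only [neg_neg, neg_zero]
  ring
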